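-- pv_equiv track=rewrite | github.com/Ovid/sqlitch-v2 | sqlitch/cli/commands/config.py | _find_section_bounds
-- ===== SOURCE A (Python) =====
-- def _find_section_bounds(
--     lines: list[str], section: str
-- ) -> tuple[int | None, int | None, int | None]:
--     if section == "DEFAULT":
--         start = 0
--         if lines and lines[0].strip().lower() == "[default]":
--             start = 1
--         end = _find_next_section(lines, start)
--         return start, end, None
--
--     header = f"[{section}]"
--     for idx, line in enumerate(lines):
--         if line.strip() == header:
--             end = _find_next_section(lines, idx + 1)
--             return idx + 1, end, idx
--     return None, None, None
--
-- def _find_next_section(lines: list[str], start: int) -> int: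
--     for idx in range(start, len(lines)):
--         stripped = lines[idx].strip()
--         if stripped.startswith("[") and stripped.endswith("]") and not stripped.startswith("#"):
--             return idx
--     return len(lines)
-- ===== SOURCE B (Python) =====
-- def _find_section_bounds(lines, section):
--     n = len(lines)
--     boundaries = []
--     for i, line in enumerate(lines):
--         s = line.strip()
--         if s.startswith("[") and s.endswith("]") and not s.startswith("#"):
--             boundaries.append(i)
--     if section == "DEFAULT":
--         start = 1 if lines and lines[0].strip().lower() == "[default]" else 0
--         end = next((b for b in boundaries if b >= start), n)
--         return start, end, None
--     header = f"[{section}]"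
--     idx = next((i for i, line in enumerate(lines) if line.strip() == header), None)
--     if idx is None:
--         return None, None, None
--     end = next((b for b in boundaries if b > idx), n)
--     return idx + 1, end, idx
-- ===== Notes on version B (the rewrite author's own statement) =====
-- stated objective: alternative
-- what changed: B indexes all boundary header lines in one pass and answers the end-bound query by searching that index list, instead of A's helper that re-scans the tail of lines for the next section header.
import Mathlib
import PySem

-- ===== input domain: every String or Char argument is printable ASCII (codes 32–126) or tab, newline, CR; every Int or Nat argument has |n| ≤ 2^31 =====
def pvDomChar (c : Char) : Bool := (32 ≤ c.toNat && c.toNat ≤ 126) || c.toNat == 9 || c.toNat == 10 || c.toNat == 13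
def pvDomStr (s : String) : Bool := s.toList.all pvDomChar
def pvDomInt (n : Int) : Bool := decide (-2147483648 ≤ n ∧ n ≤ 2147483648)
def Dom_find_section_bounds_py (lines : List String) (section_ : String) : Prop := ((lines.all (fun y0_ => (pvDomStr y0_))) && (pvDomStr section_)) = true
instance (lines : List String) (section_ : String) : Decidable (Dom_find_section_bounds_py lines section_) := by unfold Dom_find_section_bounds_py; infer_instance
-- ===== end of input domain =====

-- B replaces A's nested "scan for next section header" with a single pass that indexes all
-- boundary lines once, then answers each query by searching that index (objective: alternative).

-- ===== PORT A =====

-- shared predicate: stripped line is a section boundary (used verbatim in both Pythons)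
def pvIsBoundary (line : String) : Bool :=
  let stripped := PySem.Str.strip line
  PySem.Str.startswith stripped "[" && PySem.Str.endswith stripped "]" &&
    !PySem.Str.startswith stripped "#"

-- the 'for idx in range(start, len(lines))' loop of _find_next_section
def fsbA_go (lines : List String) : List Int → Int
  | [] => (lines.length : Int)
  | i :: rest =>
      if pvIsBoundary (PySem.List.pyGetD lines i "") then i else fsbA_go lines rest

def find_next_sectionA (lines : List String) (start : Int) : Int :=
  fsbA_go lines (PySem.List.pyRange start (lines.length : Int) 1)

-- the 'for idx, line in enumerate(lines)' loop of _find_section_bounds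
def fsbA_find (lines : List String) (header : String) :
    List (Int × String) → Option Int × Option Int × Option Int
  | [] => (none, none, none)
  | (i, line) :: rest =>
      if PySem.Str.strip line == header then
        (some (i + 1), some (find_next_sectionA lines (i + 1)), some i)
      else fsbA_find lines header rest

def find_section_bounds_py (lines : List String) (section_ : String) :
    Option Int × Option Int × Option Int :=
  if section_ == "DEFAULT" then
    let start : Int :=
      if (!lines.isEmpty) &&
          (PySem.Str.lower (PySem.Str.strip (PySem.List.pyGetD lines 0 "")) == "[default]")
      then 1 else 0
    (some start, some (find_next_sectionA lines start), none)
  else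
    fsbA_find lines ("[" ++ section_ ++ "]") (PySem.List.enumerate lines 0)

-- ===== PORT B =====

-- one pass: indices of all boundary lines
def fsbB_boundaries (lines : List String) : List Int :=
  (PySem.List.enumerate lines 0).filterMap (fun p => if pvIsBoundary p.2 then some p.1 else none)

def find_section_bounds_py_alt (lines : List String) (section_ : String) :
    Option Int × Option Int × Option Int :=
  let n : Int := lines.length
  let bs := fsbB_boundaries lines
  if section_ == "DEFAULT" then
    let start : Int :=
      if (!lines.isEmpty) &&
          (PySem.Str.lower (PySem.Str.strip (PySem.List.pyGetD lines 0 "")) == "[default]")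
      then 1 else 0
    (some start, some ((bs.find? (fun b => decide (start ≤ b))).getD n), none)
  else
    match (PySem.List.enumerate lines 0).find?
        (fun p => PySem.Str.strip p.2 == ("[" ++ section_ ++ "]")) with
    | none => (none, none, none)
    | some (i, _) => (some (i + 1), some ((bs.find? (fun b => decide (i < b))).getD n), some i)

-- ===== PRECONDITION & SPEC =====
def Spec_find_section_bounds_py (lines : List String) (section_ : String) (out : Option Int × Option Int × Option Int) : Prop := out = find_section_bounds_py_alt lines section_
instance (lines : List String) (section_ : String) (out : Option Int × Option Int × Option Int) : Decidable (Spec_find_section_bounds_py lines section_ out) := by unfold Spec_find_section_bounds_py; infer_instance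

-- ===== CLAIM (what is proved, stated in full; the proofs are below) =====
def Claim_equal_find_section_bounds_py : Prop := ∀ (lines : List String) (section_ : String), Dom_find_section_bounds_py lines section_ → Spec_find_section_bounds_py lines section_ (find_section_bounds_py lines section_)

-- ===== LEMMAS AND PROOFS =====

-- proof-side reference function: first boundary index in xs, counting from off; off+len(xs) if none
def pvScan (xs : List String) (off : Int) : Int :=
  match xs with
  | [] => off
  | x :: rest => if pvIsBoundary x then off else pvScan rest (off + 1)

-- boundaries with a generalized enumeration offset
def pvBnd (xs : List String) (off : Int) : List Int :=
  (PySem.List.enumerate xs off).filterMap (fun p => if pvIsBoundary p.2 then some p.1 else none)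

lemma pvBnd_nil (off : Int) : pvBnd [] off = [] := rfl

lemma pvBnd_cons (x : String) (xs : List String) (off : Int) :
    pvBnd (x :: xs) off = (if pvIsBoundary x then [off] else []) ++ pvBnd xs (off + 1) := by
  simp only [pvBnd, PySem.List.enumerate_cons, List.filterMap_cons]
  split_ifs <;> simp

lemma pvBnd_mem {xs : List String} {off b : Int} (h : b ∈ pvBnd xs off) :
    off ≤ b ∧ b < off + xs.length := by
  induction xs generalizing off with
  | nil => simp [pvBnd_nil] at h
  | cons x xs ih =>
      rw [pvBnd_cons] at h
      rcases List.mem_append.mp h with h1 | h2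
      · split_ifs at h1 <;> simp at h1
        subst h1
        simp only [List.length_cons]
        push_cast
        omega
      · have := ih h2; simp; omega

lemma goA_eq_scan : ∀ (ys xs : List String) (s : Nat), xs.drop s = ys → s ≤ xs.length →
    fsbA_go xs (PySem.List.pyRange (s : Int) (xs.length : Int) 1) = pvScan ys (s : Int) := by
  intro ys
  induction ys with
  | nil =>
      intro xs s hdrop hle
      have hlen : xs.length ≤ s := by
        have := congrArg List.length hdrop; simp at this; omega
      have hs : s = xs.length := le_antisymm hle hlen
      subst hs
      rw [PySem.List.pyRange_one_eq_nil (by omega)]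
      simp [fsbA_go, pvScan]
  | cons a ys ih =>
      intro xs s hdrop hle
      have hlt : s < xs.length := by
        by_contra h
        rw [List.drop_eq_nil_of_le (by omega)] at hdrop
        simp at hdrop
      have ha : xs[s]? = some a := by
        have h0 : (List.drop s xs)[(0 : Nat)]? = some a := by rw [hdrop]; rfl
        rw [List.getElem?_drop] at h0
        simpa using h0
      rw [List.getElem?_eq_getElem hlt] at ha
      have ha2 : xs[s]'hlt = a := Option.some.inj ha
      have hget : PySem.List.pyGetD xs (s : Int) "" = a := by
        rw [PySem.List.pyGetD_natCast]
        rw [List.getD_eq_getElem _ _ hlt]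
        exact ha2
      rw [PySem.List.pyRange_one_cons (by exact_mod_cast hlt)]
      simp only [fsbA_go, hget]
      by_cases hb : pvIsBoundary a
      · simp [hb, pvScan]
      · simp only [hb, pvScan]
        have hdrop' : xs.drop (s + 1) = ys := by
          rw [← List.tail_drop, hdrop]
          rfl
        have hih := ih xs (s + 1) hdrop' (by omega)
        push_cast at hih
        exact hih

-- headD of the boundary index equals the reference scan
lemma bnd_headD_eq_scan : ∀ (xs : List String) (off : Int),
    (pvBnd xs off).headD (off + xs.length) = pvScan xs off := by
  intro xs
  induction xs with
  | nil => intro off; simp [pvBnd_nil, pvScan]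
  | cons x xs ih =>
      intro off
      by_cases hb : pvIsBoundary x
      · simp [pvBnd_cons, hb, pvScan]
      · rw [pvBnd_cons, if_neg hb, List.nil_append]
        have hd : off + (((x :: xs).length : Nat) : Int) = off + 1 + xs.length := by
          simp only [List.length_cons]; push_cast; omega
        rw [hd, ih (off + 1)]
        simp [pvScan, hb]

-- find? with a predicate satisfied by every element is head?
lemma bnd_find?_ge (xs : List String) : ∀ (off s : Int), s ≤ off →
    (pvBnd xs off).find? (fun b => decide (s ≤ b)) = (pvBnd xs off).head? := by
  induction xs with
  | nil => intro off s _; simp [pvBnd_nil]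
  | cons x xs ih =>
      intro off s hs
      rw [pvBnd_cons]
      by_cases hb : pvIsBoundary x <;> simp [hb]
      · simp [hs]
      · exact ih (off + 1) s (by omega)

lemma bnd_split (lines : List String) (s : Nat) (hs : s ≤ lines.length) :
    (pvBnd lines 0).find? (fun b => decide ((s : Int) ≤ b)) =
      (pvBnd (lines.drop s) (s : Int)).find? (fun b => decide ((s : Int) ≤ b)) := by
  conv_lhs => rw [show lines = lines.take s ++ lines.drop s from (List.take_append_drop s lines).symm]
  rw [pvBnd, PySem.List.enumerate_append, List.filterMap_append, List.find?_append]
  have hnone : ((PySem.List.enumerate (lines.take s) 0).filterMap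
      (fun p => if pvIsBoundary p.2 then some p.1 else none)).find?
      (fun b => decide ((s : Int) ≤ b)) = none := by
    rw [List.find?_eq_none]
    intro b hb
    have := pvBnd_mem (xs := lines.take s) (off := 0) (b := b) hb
    simp at this ⊢
    omega
  rw [hnone]
  simp [pvBnd, List.length_take, Nat.min_eq_left hs]

-- the master lemma: A's next-section scan = B's search of the boundary index
lemma master (lines : List String) (s : Nat) (hs : s ≤ lines.length) :
    find_next_sectionA lines (s : Int) =
      ((fsbB_boundaries lines).find? (fun b => decide ((s : Int) ≤ b))).getD (lines.length : Int) := by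
  have hb : fsbB_boundaries lines = pvBnd lines 0 := rfl
  rw [hb, bnd_split lines s hs, bnd_find?_ge _ _ _ (le_refl _)]
  have h2 := bnd_headD_eq_scan (lines.drop s) (s : Int)
  have hlen : (s : Int) + (lines.drop s).length = (lines.length : Int) := by
    simp; omega
  rw [hlen] at h2
  rw [find_next_sectionA, goA_eq_scan (lines.drop s) lines s rfl hs, ← h2]
  cases pvBnd (lines.drop s) (s : Int) <;> rfl

-- A's enumerate loop expressed through find?
lemma findA_eq_find? (lines : List String) (header : String) : ∀ (l : List (Int × String)),
    fsbA_find lines header l =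
      match l.find? (fun p => PySem.Str.strip p.2 == header) with
      | none => (none, none, none)
      | some (i, _) => (some (i + 1), some (find_next_sectionA lines (i + 1)), some i) := by
  intro l
  induction l with
  | nil => rfl
  | cons p rest ih =>
      obtain ⟨i, line⟩ := p
      by_cases h : PySem.Str.strip line == header <;>
        simp [fsbA_find, h, ih]

-- ===== VERDICT (by name: the statement is the Claim_ definition above) =====
theorem find_section_bounds_py_spec : Claim_equal_find_section_bounds_py := by
  intro lines section_ _
  unfold Spec_find_section_bounds_py find_section_bounds_py find_section_bounds_py_alt
  by_cases hsec : section_ == "DEFAULT"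
  · rw [if_pos hsec, if_pos hsec]
    by_cases hdef : (!lines.isEmpty) &&
        (PySem.Str.lower (PySem.Str.strip (PySem.List.pyGetD lines 0 "")) == "[default]")
    · rw [if_pos hdef]
      have h1le : 1 ≤ lines.length := by
        cases lines with
        | nil => simp at hdef
        | cons _ _ => simp
      rw [show (1 : Int) = ((1 : Nat) : Int) from rfl]
      simp only [master lines 1 h1le]
    · rw [if_neg hdef]
      rw [show (0 : Int) = ((0 : Nat) : Int) from rfl]
      simp only [master lines 0 (Nat.zero_le _)]
  · rw [if_neg hsec, if_neg hsec]
    rw [findA_eq_find?]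
    cases hf : (PySem.List.enumerate lines 0).find?
        (fun p => PySem.Str.strip p.2 == ("[" ++ section_ ++ "]")) with
    | none => rfl
    | some p =>
        obtain ⟨i, line⟩ := p
        have hmem := List.mem_of_find?_eq_some hf
        rw [PySem.List.mem_enumerate_iff] at hmem
        obtain ⟨k, hk, hp⟩ := hmem
        have hi : i = (k : Int) := by
          have := congrArg Prod.fst hp; simpa using this
        subst hi
        have hcast : (k : Int) + 1 = ((k + 1 : Nat) : Int) := by push_cast; ring
        have hpred : (fun b => decide ((k : Int) < b)) =
            (fun b => decide (((k + 1 : Nat) : Int) ≤ b)) := by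
          funext b
          have hiff : ((k : Int) < b) ↔ (((k + 1 : Nat) : Int) ≤ b) := by push_cast; omega
          exact decide_eq_decide.mpr hiff
        simp only [hcast, hpred, master lines (k + 1) (by omega)]
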